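-- pv_equiv track=rewrite | github.com/aartamonau/vbmap_utils | vbmap_vis.py | tag_replication_counts
-- ===== SOURCE A (Python) =====
-- from itertools import chain
--
-- def tag_replication_counts(vbmap, nodes, tags_list, tags):
--     counts = []
--     for tag in tags_list:
--         tag_counts = []
--
--         for i, node in enumerate(nodes):
--             replicas = set()
--
--             for chain in vbmap:
--                 if chain[0] != node:
--                     continue
--
--                 replicas.update(r for r in chain[1:] if tags[r] == tag)
--
--             tag_counts.append(len(replicas))
--
--         counts.append(tag_counts)
--
--     return counts
-- ===== SOURCE B (Python) =====
-- def tag_replication_counts(vbmap, nodes, tags_list, tags):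
--     if not tags_list:
--         return []
--     per_node = []
--     for node in nodes:
--         by_tag = {}
--         for chain in vbmap:
--             if chain[0] == node:
--                 for r in chain[1:]:
--                     by_tag.setdefault(tags[r], set()).add(r)
--         per_node.append(by_tag)
--     return [[len(by_tag.get(tag, ())) for by_tag in per_node]
--             for tag in tags_list]
-- ===== Notes on version B (the rewrite author's own statement) =====
-- stated objective: alternative
-- what changed: A rescans the whole vbmap for every (tag, node) pair; B scans vbmap once per head node building a tag->replica-set dict and then fills the count table by dict lookups, and returns [] early for an empty tags_list just as A does (asymptotically fewer scans, but a timing run could not measure it).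
import Mathlib
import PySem

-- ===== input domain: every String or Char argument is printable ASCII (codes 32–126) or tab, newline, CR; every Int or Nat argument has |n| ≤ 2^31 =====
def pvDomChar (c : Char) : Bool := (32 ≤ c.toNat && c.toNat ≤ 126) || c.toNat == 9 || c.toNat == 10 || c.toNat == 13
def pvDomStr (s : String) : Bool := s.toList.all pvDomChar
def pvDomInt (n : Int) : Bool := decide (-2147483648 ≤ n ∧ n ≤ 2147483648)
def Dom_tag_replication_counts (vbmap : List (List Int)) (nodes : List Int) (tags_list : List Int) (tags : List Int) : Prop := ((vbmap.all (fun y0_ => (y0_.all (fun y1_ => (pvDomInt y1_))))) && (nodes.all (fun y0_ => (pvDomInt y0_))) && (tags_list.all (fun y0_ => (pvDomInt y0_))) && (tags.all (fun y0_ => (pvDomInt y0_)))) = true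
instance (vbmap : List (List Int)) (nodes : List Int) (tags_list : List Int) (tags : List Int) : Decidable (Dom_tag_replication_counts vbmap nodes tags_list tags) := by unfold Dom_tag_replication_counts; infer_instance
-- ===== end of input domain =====

-- B scans vbmap once per head node building a tag→replica-set dict (instead of A's rescan per (tag, node) pair), then fills the table by lookups.

-- ===== PORT A =====
-- replicas.update(r for r in chain[1:] if tags[r] == tag)
def trcAStep (tags : List Int) (tag : Int) (s : PySem.Set Int) (r : Int) : PySem.Set Int :=
  match PySem.List.pyGet? tags r with
  | none => s          -- tags[r] raises IndexError; excluded by Pre_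
  | some t => if t = tag then PySem.Set.add s r else s

def trcAChain (tags : List Int) (node tag : Int) (replicas : PySem.Set Int) (chain : List Int) : PySem.Set Int :=
  match PySem.List.pyGet? chain 0 with
  | none => replicas   -- chain[0] raises IndexError; excluded by Pre_
  | some h => if h ≠ node then replicas
              else (chain.drop 1).foldl (trcAStep tags tag) replicas

def tag_replication_counts (vbmap : List (List Int)) (nodes : List Int) (tags_list : List Int) (tags : List Int) : List (List Int) :=
  tags_list.map (fun tag =>
    nodes.map (fun node =>
      ((PySem.Set.len (vbmap.foldl (trcAChain tags node tag) PySem.Set.empty) : Int))))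

-- ===== PORT B =====
-- for r in chain[1:]: by_tag.setdefault(tags[r], set()).add(r)
def trcBRep (tags : List Int) (rs : List Int) (bt : PySem.Dict Int (PySem.Set Int)) : PySem.Dict Int (PySem.Set Int) :=
  match rs with
  | [] => bt
  | r :: rest =>
      match PySem.List.pyGet? tags r with
      | none => trcBRep tags rest bt   -- tags[r] raises IndexError; excluded by Pre_
      | some t => trcBRep tags rest (bt.insert t (PySem.Set.add (bt.getD t PySem.Set.empty) r))

-- for chain in vbmap: if chain[0] == node: …
def trcBNode (tags : List Int) (node : Int) (cs : List (List Int)) (bt : PySem.Dict Int (PySem.Set Int)) : PySem.Dict Int (PySem.Set Int) :=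
  match cs with
  | [] => bt
  | chain :: rest =>
      match PySem.List.pyGet? chain 0 with
      | none => trcBNode tags node rest bt   -- chain[0] raises IndexError; excluded by Pre_
      | some h =>
          if h = node then trcBNode tags node rest (trcBRep tags (chain.drop 1) bt)
          else trcBNode tags node rest bt

def tag_replication_counts_alt (vbmap : List (List Int)) (nodes : List Int) (tags_list : List Int) (tags : List Int) : List (List Int) :=
  if tags_list = [] then []
  else
    let per_node := nodes.map (fun node => trcBNode tags node vbmap PySem.Dict.empty)
    tags_list.map (fun tag =>
      per_node.map (fun bt => ((PySem.Set.len (bt.getD tag PySem.Set.empty)) : Int)))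

-- ===== PRECONDITION & SPEC =====
-- Pre_ excludes exactly the inputs on which A (and B) raise IndexError: tags_list and nodes both
-- nonempty while vbmap contains an empty chain (chain[0]) or a chain whose head is in nodes with a
-- replica index out of range for tags (tags[r]). On every input A returns normally, Pre_ holds.
def Pre_tag_replication_counts (vbmap : List (List Int)) (nodes : List Int) (tags_list : List Int) (tags : List Int) : Prop :=
  tags_list ≠ [] → nodes ≠ [] →
    ∀ chain ∈ vbmap, chain ≠ [] ∧
      (chain.headI ∈ nodes → ∀ r ∈ chain.drop 1, -(tags.length : Int) ≤ r ∧ r < tags.length)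
instance (vbmap : List (List Int)) (nodes : List Int) (tags_list : List Int) (tags : List Int) : Decidable (Pre_tag_replication_counts vbmap nodes tags_list tags) := by unfold Pre_tag_replication_counts; infer_instance

def pvWitness_tag_replication_counts : List (List Int) × List Int × List Int × List Int :=
  ([[0, 1], [1, 0, 1]], [0, 1], [0, 1], [0, 1])

def Spec_tag_replication_counts (vbmap : List (List Int)) (nodes : List Int) (tags_list : List Int) (tags : List Int) (out : List (List Int)) : Prop := out = tag_replication_counts_alt vbmap nodes tags_list tags
instance (vbmap : List (List Int)) (nodes : List Int) (tags_list : List Int) (tags : List Int) (out : List (List Int)) : Decidable (Spec_tag_replication_counts vbmap nodes tags_list tags out) := by unfold Spec_tag_replication_counts; infer_instance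

-- ===== CLAIM =====
def Claim_equal_tag_replication_counts : Prop := ∀ (vbmap : List (List Int)) (nodes : List Int) (tags_list : List Int) (tags : List Int), Dom_tag_replication_counts vbmap nodes tags_list tags → Pre_tag_replication_counts vbmap nodes tags_list tags → Spec_tag_replication_counts vbmap nodes tags_list tags (tag_replication_counts vbmap nodes tags_list tags)

-- ===== LEMMAS AND PROOFS =====

-- B's inner replica loop, observed at one tag key, is A's replica accumulation for that tag
theorem trcBRep_getD (tags : List Int) (tag : Int) :
    ∀ (rs : List Int) (bt : PySem.Dict Int (PySem.Set Int)),
      (trcBRep tags rs bt).getD tag PySem.Set.empty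
        = rs.foldl (trcAStep tags tag) (bt.getD tag PySem.Set.empty) := by
  intro rs
  induction rs with
  | nil => intro bt; rfl
  | cons r rest ih =>
      intro bt
      rw [List.foldl_cons]
      cases hg : PySem.List.pyGet? tags r with
      | none =>
          simp only [trcBRep, hg]
          rw [ih]
          simp [trcAStep, hg]
      | some t =>
          simp only [trcBRep, hg]
          rw [ih, PySem.Dict.getD_insert]
          by_cases h : t = tag
          · subst h; simp [trcAStep, hg]
          · simp [trcAStep, hg, h, show tag ≠ t from fun hh => h hh.symm]

-- B's per-node pass over vbmap, observed at one tag key, is A's fold for (node, tag)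
theorem trcBNode_getD (tags : List Int) (node tag : Int) :
    ∀ (cs : List (List Int)) (bt : PySem.Dict Int (PySem.Set Int)),
      (trcBNode tags node cs bt).getD tag PySem.Set.empty
        = cs.foldl (trcAChain tags node tag) (bt.getD tag PySem.Set.empty) := by
  intro cs
  induction cs with
  | nil => intro bt; rfl
  | cons chain rest ih =>
      intro bt
      rw [List.foldl_cons]
      cases hg : PySem.List.pyGet? chain 0 with
      | none =>
          simp only [trcBNode, hg]
          rw [ih]
          simp [trcAChain, hg]
      | some h =>
          simp only [trcBNode, hg]
          by_cases hn : h = node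
          · subst hn
            rw [if_pos rfl, ih, trcBRep_getD]
            simp [trcAChain, hg]
          · rw [if_neg hn, ih]
            simp [trcAChain, hg, hn]

-- ===== VERDICT =====
theorem tag_replication_counts_spec : Claim_equal_tag_replication_counts := by
  intro vbmap nodes tags_list tags _hdom _hpre
  unfold Spec_tag_replication_counts tag_replication_counts tag_replication_counts_alt
  by_cases htl : tags_list = []
  · simp [htl]
  · rw [if_neg htl]
    apply List.map_congr_left
    intro tag _
    rw [List.map_map]
    apply List.map_congr_left
    intro node _
    simp only [Function.comp]
    rw [trcBNode_getD tags node tag vbmap PySem.Dict.empty]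
    rfl
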